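-- pv_equiv track=rewrite | github.com/julesgilligan/sudokube | sudokube/ARCHIVE sudokube.py | appendAll
-- ===== SOURCE A (Python) =====
-- def appendAll(LoLists):
--     if len(LoLists) == 1:
--         return [[x] for x in LoLists[0]]
--     else:
--         front = LoLists[0]
--         rest = appendAll(LoLists[1:])
--         # one line, without checking
--         result = [[x] + y for x in front for y in rest if x not in y]
--         return result
-- ===== SOURCE B (Python) =====
-- def appendAll(LoLists):
--     acc = [[x] for x in LoLists[-1]]
--     for lst in reversed(LoLists[:-1]):
--         acc = [[x] + y for x in lst for y in acc if x not in y]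
--     return acc
-- ===== Notes on version B (the rewrite author's own statement) =====
-- stated objective: alternative
-- what changed: Replaces the slice-and-recurse implementation with an iterative right-fold: seed the accumulator from the last list and fold the remaining lists back-to-front, extending each partial combination with every non-member element.
import Mathlib
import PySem

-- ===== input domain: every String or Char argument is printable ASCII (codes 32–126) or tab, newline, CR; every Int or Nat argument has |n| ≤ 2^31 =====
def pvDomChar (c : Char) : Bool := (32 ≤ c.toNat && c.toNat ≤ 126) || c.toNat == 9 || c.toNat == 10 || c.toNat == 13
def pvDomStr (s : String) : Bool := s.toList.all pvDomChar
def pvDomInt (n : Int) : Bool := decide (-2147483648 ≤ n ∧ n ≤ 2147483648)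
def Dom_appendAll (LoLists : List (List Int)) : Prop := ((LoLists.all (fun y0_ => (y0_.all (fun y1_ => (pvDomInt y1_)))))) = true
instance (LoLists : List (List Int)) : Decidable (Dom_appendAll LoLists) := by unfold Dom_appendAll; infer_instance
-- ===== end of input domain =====

-- B replaces A's slice-and-recurse with an iterative right-fold over the lists (same cost, different decomposition).


-- ===== PORT A =====
-- literal port of A's recursion: base case length = 1, else prepend every x of the
-- first list to every recursive combination y with x ∉ y (comprehension order kept)
def appendAll (LoLists : List (List Int)) : List (List Int) :=
  match LoLists with
  | [] => []  -- Python raises IndexError here; excluded by Pre_appendAll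
  | front :: rest =>
    if rest = [] then front.map (fun x => [x])
    else
      front.flatMap (fun x =>
        ((appendAll rest).filter (fun y => ¬ x ∈ y)).map (fun y => x :: y))

-- ===== PORT B =====
-- Source B: one comprehension step of the fold
def stepB (lst : List Int) (acc : List (List Int)) : List (List Int) :=
  lst.flatMap (fun x => (acc.filter (fun y => ¬ x ∈ y)).map (fun y => x :: y))

-- seed acc from the last list, then fold the remaining lists back-to-front
def appendAll_alt (LoLists : List (List Int)) : List (List Int) :=
  match LoLists.getLast? with
  | none => []  -- Python raises IndexError here; excluded by Pre_appendAll
  | some last => LoLists.dropLast.foldr stepB (last.map (fun x => [x]))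

-- ===== PRECONDITION & SPEC =====
-- both programs raise IndexError on the empty list of lists
def Pre_appendAll (LoLists : List (List Int)) : Prop := LoLists ≠ []
instance (LoLists : List (List Int)) : Decidable (Pre_appendAll LoLists) := by unfold Pre_appendAll; infer_instance
def pvWitness_appendAll : List (List Int) := [[1, 2], [2, 3]]
def Spec_appendAll (LoLists : List (List Int)) (out : List (List Int)) : Prop := out = appendAll_alt LoLists
instance (LoLists : List (List Int)) (out : List (List Int)) : Decidable (Spec_appendAll LoLists out) := by unfold Spec_appendAll; infer_instance

-- ===== CLAIM (what is proved, stated in full; the proofs are below) =====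
def Claim_equal_appendAll : Prop := ∀ (LoLists : List (List Int)), Dom_appendAll LoLists → Pre_appendAll LoLists → Spec_appendAll LoLists (appendAll LoLists)

-- ===== LEMMAS AND PROOFS =====
theorem appendAll_alt_cons (front : List Int) (rest : List (List Int)) (h : rest ≠ []) :
    appendAll_alt (front :: rest) = stepB front (appendAll_alt rest) := by
  unfold appendAll_alt
  cases hl : rest.getLast? with
  | none => exact absurd (List.getLast?_eq_none_iff.mp hl) h
  | some last =>
    rw [List.getLast?_cons, hl, List.dropLast_cons_of_ne_nil h]
    simp [List.foldr]

theorem appendAll_eq_alt (LoLists : List (List Int)) (h : LoLists ≠ []) :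
    appendAll LoLists = appendAll_alt LoLists := by
  induction LoLists with
  | nil => exact absurd rfl h
  | cons front rest ih =>
    by_cases hr : rest = []
    · subst hr
      simp [appendAll, appendAll_alt]
    · rw [appendAll_alt_cons front rest hr, ← ih hr]
      simp [appendAll, hr, stepB]

-- ===== VERDICT (by name: the statement is the Claim_ definition above) =====
theorem appendAll_spec : Claim_equal_appendAll := by
  intro L _ hpre
  exact appendAll_eq_alt L hpre
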